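-- pv_equiv track=rewrite | github.com/middledoor0421/bird_sahi_temporal | scripts/make_window_sparse_split.py | pos_segments
-- ===== SOURCE A (Python) =====
-- def pos_segments(flags):
--     segs = []
--     i = 0
--     n = len(flags)
--     while i < n:
--         if flags[i] == 1:
--             j = i
--             while j + 1 < n and flags[j + 1] == 1:
--                 j += 1
--             segs.append((i, j))
--             i = j + 1
--         else:
--             i += 1
--     return segs
-- ===== SOURCE B (Python) =====
-- def pos_segments(flags):
--     n = len(flags)
--     segs = []
--     start = 0
--     for k in range(n):
--         cur = flags[k] == 1
--         prev = k > 0 and flags[k - 1] == 1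
--         nxt = k + 1 < n and flags[k + 1] == 1
--         if cur and not prev:
--             start = k
--         if cur and not nxt:
--             segs.append((start, k))
--     return segs
-- ===== Notes on version B (the rewrite author's own statement) =====
-- stated objective: alternative
-- what changed: Replaces the nested run-consuming while loop with a single edge-detecting pass: a rising edge (cur==1, prev!=1) records the segment start and a falling edge (cur==1, next!=1) emits (start, k).
import Mathlib
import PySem

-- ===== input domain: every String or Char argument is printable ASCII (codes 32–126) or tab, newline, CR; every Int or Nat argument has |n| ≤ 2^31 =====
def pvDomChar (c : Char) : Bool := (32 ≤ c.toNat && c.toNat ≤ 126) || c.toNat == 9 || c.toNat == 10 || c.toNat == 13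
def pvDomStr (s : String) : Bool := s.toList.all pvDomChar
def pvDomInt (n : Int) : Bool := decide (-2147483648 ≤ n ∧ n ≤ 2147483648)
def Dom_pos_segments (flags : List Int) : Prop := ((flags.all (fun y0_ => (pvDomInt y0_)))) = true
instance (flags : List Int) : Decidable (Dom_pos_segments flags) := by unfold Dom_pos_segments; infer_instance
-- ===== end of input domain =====

-- B replaces A's nested run-consuming while loop by a single edge-detecting pass; alternative decomposition, same cost.

-- ===== PORT A =====
-- inner loop of A: 'while j + 1 < n and flags[j + 1] == 1: j += 1'
-- (the fuel argument only makes the while loop structurally total; it never runs out on the fuel the callers pass)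
def posInner (flags : List Int) (n j : Nat) : Nat → Nat
  | 0 => j
  | fuel + 1 =>
    if j + 1 < n ∧ flags.getD (j + 1) 0 = 1 then posInner flags n (j + 1) fuel else j

-- outer loop of A: 'while i < n'
def posOuter (flags : List Int) (n i : Nat) : Nat → List (Int × Int)
  | 0 => []
  | fuel + 1 =>
    if i < n then
      if flags.getD i 0 = 1 then
        ((i : Int), (posInner flags n i fuel : Int))
          :: posOuter flags n (posInner flags n i fuel + 1) fuel
      else posOuter flags n (i + 1) fuel
    else []

def pos_segments (flags : List Int) : List (Int × Int) :=
  posOuter flags flags.length 0 (flags.length + 1)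

-- ===== PORT B =====
-- the body of B's single 'for k in range(n)' pass
def altStep (flags : List Int) (n : Nat) (st : Nat × List (Int × Int)) (k : Nat) :
    Nat × List (Int × Int) :=
  let cur : Bool := flags.getD k 0 = 1
  let prev : Bool := decide (0 < k) && decide (flags.getD (k - 1) 0 = 1)
  let nxt : Bool := decide (k + 1 < n) && decide (flags.getD (k + 1) 0 = 1)
  let start := if cur && !prev then k else st.1
  let segs := if cur && !nxt then st.2 ++ [((start : Int), (k : Int))] else st.2
  (start, segs)

def pos_segments_alt (flags : List Int) : List (Int × Int) :=
  let n := flags.length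
  ((List.range n).foldl (altStep flags n) (0, [])).2

-- ===== PRECONDITION & SPEC =====
def Spec_pos_segments (flags : List Int) (out : List (Int × Int)) : Prop := out = pos_segments_alt flags
instance (flags : List Int) (out : List (Int × Int)) : Decidable (Spec_pos_segments flags out) := by unfold Spec_pos_segments; infer_instance

-- ===== CLAIM (what is proved, stated in full; the proofs are below) =====
def Claim_equal_pos_segments : Prop := ∀ (flags : List Int), Dom_pos_segments flags → Spec_pos_segments flags (pos_segments flags)

-- ===== LEMMAS AND PROOFS =====

theorem posInner_ge (flags : List Int) (n : Nat) (g : Nat) : ∀ j, j ≤ posInner flags n j g := by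
  induction g with
  | zero => intro j; exact le_refl j
  | succ g ih =>
    intro j
    rw [posInner]
    split
    · exact le_trans (Nat.le_succ j) (ih (j + 1))
    · exact le_refl j

theorem posInner_lt (flags : List Int) (n : Nat) (g : Nat) :
    ∀ j, j < n → posInner flags n j g < n := by
  induction g with
  | zero => intro j h; exact h
  | succ g ih =>
    intro j h
    rw [posInner]
    split
    · exact ih (j + 1) (by omega)
    · exact h

theorem posInner_eq_self (flags : List Int) (n j g : Nat)
    (h : ¬ (j + 1 < n ∧ flags.getD (j + 1) 0 = 1)) : posInner flags n j g = j := by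
  cases g with
  | zero => rfl
  | succ g => rw [posInner, if_neg h]

theorem posInner_stop (flags : List Int) (n : Nat) (g : Nat) :
    ∀ j, n - j ≤ g →
      ¬ (posInner flags n j g + 1 < n ∧ flags.getD (posInner flags n j g + 1) 0 = 1) := by
  induction g with
  | zero =>
    intro j hg
    rw [posInner]
    rintro ⟨h1, -⟩
    omega
  | succ g ih =>
    intro j hg
    rw [posInner]
    split
    · next hc => exact ih (j + 1) (by omega)
    · next hc => exact hc

theorem posInner_fuel (flags : List Int) (n : Nat) (g₁ : Nat) :
    ∀ g₂ j, n - j ≤ g₁ → n - j ≤ g₂ → posInner flags n j g₁ = posInner flags n j g₂ := by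
  induction g₁ with
  | zero =>
    intro g₂ j h1 h2
    rw [posInner]
    exact (posInner_eq_self flags n j g₂ (by rintro ⟨h, -⟩; omega)).symm
  | succ g ih =>
    intro g₂ j h1 h2
    by_cases hc : j + 1 < n ∧ flags.getD (j + 1) 0 = 1
    · cases g₂ with
      | zero => omega
      | succ g₂ =>
        rw [posInner, if_pos hc, posInner, if_pos hc]
        exact ih g₂ (j + 1) (by omega) (by omega)
    · rw [posInner_eq_self flags n j (g + 1) hc, posInner_eq_self flags n j g₂ hc]

theorem posInner_succ (flags : List Int) (n j g : Nat) (hg : n - j ≤ g)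
    (h1 : j + 1 < n) (h2 : flags.getD (j + 1) 0 = 1) :
    posInner flags n j g = posInner flags n (j + 1) g := by
  cases g with
  | zero => omega
  | succ g =>
    rw [posInner, if_pos ⟨h1, h2⟩]
    exact posInner_fuel flags n g (g + 1) (j + 1) (by omega) (by omega)

-- B's step at a position k carrying a 1, where the recorded start is already st
theorem altStep_run (flags : List Int) (n k st : Nat) (segs : List (Int × Int))
    (h1 : flags.getD k 0 = 1)
    (hst : (0 < k ∧ flags.getD (k - 1) 0 = 1) ∨ k = st) :
    altStep flags n (st, segs) k
      = (st, if k + 1 < n ∧ flags.getD (k + 1) 0 = 1 then segs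
             else segs ++ [((st : Int), (k : Int))]) := by
  have hc : decide (flags.getD k 0 = 1) = true := decide_eq_true h1
  have hs : (if (!(decide (0 < k) && decide (flags.getD (k - 1) 0 = 1))) = true then k else st)
      = st := by
    rcases hst with ⟨hpos, hprev⟩ | rfl
    · rw [decide_eq_true hpos, decide_eq_true hprev]; simp
    · exact ite_self k
  by_cases hn2 : k + 1 < n ∧ flags.getD (k + 1) 0 = 1
  · have hb : (decide (k + 1 < n) && decide (flags.getD (k + 1) 0 = 1)) = true := by
      rw [decide_eq_true hn2.1, decide_eq_true hn2.2]; rfl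
    rw [if_pos hn2]
    simp only [altStep, hc, Bool.true_and, hs, hb, Bool.not_true,
      Bool.false_eq_true, if_false]
  · have hb : (decide (k + 1 < n) && decide (flags.getD (k + 1) 0 = 1)) = false := by
      rcases Decidable.not_and_iff_not_or_not.mp hn2 with h' | h'
      · rw [decide_eq_false h']; rfl
      · rw [decide_eq_false h', Bool.and_false]
    rw [if_neg hn2]
    simp only [altStep, hc, Bool.true_and, hs, hb, Bool.not_false, if_true]

-- B's step at a rising edge: the start becomes k, whatever it was
theorem altStep_rise (flags : List Int) (n k st : Nat) (segs : List (Int × Int))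
    (h1 : flags.getD k 0 = 1)
    (hprev : k = 0 ∨ flags.getD (k - 1) 0 ≠ 1) :
    altStep flags n (st, segs) k
      = (k, if k + 1 < n ∧ flags.getD (k + 1) 0 = 1 then segs
            else segs ++ [((k : Int), (k : Int))]) := by
  have hc : decide (flags.getD k 0 = 1) = true := decide_eq_true h1
  have hp : (decide (0 < k) && decide (flags.getD (k - 1) 0 = 1)) = false := by
    rcases hprev with rfl | h'
    · rfl
    · rw [decide_eq_false h', Bool.and_false]
  by_cases hn2 : k + 1 < n ∧ flags.getD (k + 1) 0 = 1
  · have hb : (decide (k + 1 < n) && decide (flags.getD (k + 1) 0 = 1)) = true := by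
      rw [decide_eq_true hn2.1, decide_eq_true hn2.2]; rfl
    rw [if_pos hn2]
    simp only [altStep, hc, Bool.true_and, hp, hb, Bool.not_true, Bool.not_false,
      Bool.false_eq_true, if_false, if_true]
  · have hb : (decide (k + 1 < n) && decide (flags.getD (k + 1) 0 = 1)) = false := by
      rcases Decidable.not_and_iff_not_or_not.mp hn2 with h' | h'
      · rw [decide_eq_false h']; rfl
      · rw [decide_eq_false h', Bool.and_false]
    rw [if_neg hn2]
    simp only [altStep, hc, Bool.true_and, hp, hb, Bool.not_false, if_true]

-- B's step at a position carrying no 1 is a no-op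
theorem altStep_skip (flags : List Int) (n k st : Nat) (segs : List (Int × Int))
    (h1 : flags.getD k 0 ≠ 1) :
    altStep flags n (st, segs) k = (st, segs) := by
  have hc : decide (flags.getD k 0 = 1) = false := decide_eq_false h1
  simp only [altStep, hc, Bool.false_and, Bool.false_eq_true, if_false]

-- folding B's step across the tail of a run of 1s: the start stays st and (st, end) is emitted at the end
theorem run_fold (flags : List Int) (n : Nat) (g k st : Nat) (segs : List (Int × Int))
    (hg : n - k ≤ g) (h1 : flags.getD k 0 = 1)
    (hst : (0 < k ∧ flags.getD (k - 1) 0 = 1) ∨ k = st) :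
    (List.range' k (posInner flags n k g + 1 - k)).foldl (altStep flags n) (st, segs)
      = (st, segs ++ [((st : Int), ((posInner flags n k g : Nat) : Int))]) := by
  have hge := posInner_ge flags n g k
  by_cases hcont : k + 1 < n ∧ flags.getD (k + 1) 0 = 1
  · have heq : posInner flags n k g = posInner flags n (k + 1) g :=
      posInner_succ flags n k g hg hcont.1 hcont.2
    have hge' := posInner_ge flags n g (k + 1)
    have hlen : posInner flags n k g + 1 - k = (posInner flags n (k + 1) g + 1 - (k + 1)) + 1 := by
      omega
    rw [hlen, List.range'_succ, List.foldl_cons,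
      altStep_run flags n k st segs h1 hst, if_pos hcont, heq]
    exact run_fold flags n g (k + 1) st segs (by omega) hcont.2
      (Or.inl ⟨Nat.succ_pos k, by simpa using h1⟩)
  · have heq : posInner flags n k g = k := posInner_eq_self flags n k g hcont
    rw [heq]
    have hlen : k + 1 - k = 1 := by omega
    rw [hlen, List.range'_one, List.foldl_cons, List.foldl_nil,
      altStep_run flags n k st segs h1 hst, if_neg hcont]
termination_by n - k
decreasing_by omega

-- main invariant: from any position not strictly inside a run, B's fold appends exactly A's segments
theorem main_fold (flags : List Int) (n : Nat) (f i start : Nat) (segs : List (Int × Int))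
    (hf : n - i < f)
    (hinv : i = n ∨ flags.getD i 0 ≠ 1 ∨ i = 0 ∨ flags.getD (i - 1) 0 ≠ 1) :
    ((List.range' i (n - i)).foldl (altStep flags n) (start, segs)).2
      = segs ++ posOuter flags n i f := by
  obtain ⟨f', rfl⟩ : ∃ f', f = f' + 1 := ⟨f - 1, by omega⟩
  by_cases h : i < n
  · rw [posOuter, if_pos h]
    have hgI : n - i ≤ f' := by omega
    by_cases h1 : flags.getD i 0 = 1
    · rw [if_pos h1]
      have hprev : i = 0 ∨ flags.getD (i - 1) 0 ≠ 1 := by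
        rcases hinv with h' | h' | h' | h'
        · omega
        · exact absurd h1 h'
        · exact Or.inl h'
        · exact Or.inr h'
      have hlen : n - i = (n - (i + 1)) + 1 := by omega
      rw [hlen, List.range'_succ, List.foldl_cons, altStep_rise flags n i start segs h1 hprev]
      by_cases hcont : i + 1 < n ∧ flags.getD (i + 1) 0 = 1
      · rw [if_pos hcont]
        have heq : posInner flags n i f' = posInner flags n (i + 1) f' :=
          posInner_succ flags n i f' hgI hcont.1 hcont.2
        have hge' := posInner_ge flags n f' (i + 1)
        have hlt' := posInner_lt flags n f' (i + 1) hcont.1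
        have hsplit : List.range' (i + 1) (n - (i + 1))
            = List.range' (i + 1) (posInner flags n (i + 1) f' + 1 - (i + 1))
              ++ List.range' (posInner flags n (i + 1) f' + 1)
                  (n - (posInner flags n (i + 1) f' + 1)) := by
          have e := @List.range'_append (i + 1) (posInner flags n (i + 1) f' + 1 - (i + 1))
            (n - (posInner flags n (i + 1) f' + 1)) 1
          rw [show (i + 1) + 1 * (posInner flags n (i + 1) f' + 1 - (i + 1))
                = posInner flags n (i + 1) f' + 1 by omega,
              show (posInner flags n (i + 1) f' + 1 - (i + 1))
                  + (n - (posInner flags n (i + 1) f' + 1))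
                = n - (i + 1) by omega] at e
          exact e.symm
        rw [hsplit, List.foldl_append,
          run_fold flags n f' (i + 1) i segs (by omega) hcont.2
            (Or.inl ⟨Nat.succ_pos i, by simpa using h1⟩)]
        have hstop := posInner_stop flags n f' (i + 1) (by omega)
        have hinv' : posInner flags n (i + 1) f' + 1 = n
            ∨ flags.getD (posInner flags n (i + 1) f' + 1) 0 ≠ 1
            ∨ posInner flags n (i + 1) f' + 1 = 0
            ∨ flags.getD (posInner flags n (i + 1) f' + 1 - 1) 0 ≠ 1 := by
          rcases Decidable.not_and_iff_not_or_not.mp hstop with h' | h'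
          · left; omega
          · right; left; exact h'
        rw [main_fold flags n f' (posInner flags n (i + 1) f' + 1) i
          (segs ++ [((i : Int), (posInner flags n (i + 1) f' : Int))]) (by omega) hinv', heq]
        simp
      · rw [if_neg hcont]
        have heq : posInner flags n i f' = i := posInner_eq_self flags n i f' hcont
        have hinv' : i + 1 = n ∨ flags.getD (i + 1) 0 ≠ 1 ∨ i + 1 = 0
            ∨ flags.getD (i + 1 - 1) 0 ≠ 1 := by
          rcases Decidable.not_and_iff_not_or_not.mp hcont with h' | h'
          · left; omega
          · right; left; exact h'
        rw [main_fold flags n f' (i + 1) i (segs ++ [((i : Int), (i : Int))]) (by omega) hinv',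
          heq]
        simp
    · rw [if_neg h1]
      have hlen : n - i = (n - (i + 1)) + 1 := by omega
      rw [hlen, List.range'_succ, List.foldl_cons, altStep_skip flags n i start segs h1,
        main_fold flags n f' (i + 1) start segs (by omega)
          (Or.inr (Or.inr (Or.inr (by simpa using h1))))]
  · have hi' : n - i = 0 := by omega
    rw [hi', posOuter, if_neg h]
    simp
termination_by n - i
decreasing_by all_goals omega

-- ===== VERDICT (by name: the statement is the Claim_ definition above) =====
theorem pos_segments_spec : Claim_equal_pos_segments := by
  intro flags _
  unfold Spec_pos_segments pos_segments
  show posOuter flags flags.length 0 (flags.length + 1)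
      = ((List.range flags.length).foldl (altStep flags flags.length) (0, [])).2
  rw [List.range_eq_range']
  have := main_fold flags flags.length (flags.length + 1) 0 0 [] (by omega)
    (Or.inr (Or.inr (Or.inl rfl)))
  rw [Nat.sub_zero] at this
  rw [this, List.nil_append]
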